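-- pv_equiv track=rewrite | github.com/hwbest403/Portfolio | MathAI/1step-model/utils.py | convert_unk_opr
-- ===== SOURCE A (Python) =====
-- def get_key(value, data_dict):
--     for key, val in data_dict.items():
--         if value == val:
--             return key
--
--     return None
--
-- def convert_unk_opr(text):
--     """
--     미지수 및 연산기호 변환
--     :param text:
--     :return:
--     """
--     unks = ['A', 'B']
--     oprs = ['+', '-', '*', '/']
--
--     words = text.split()
--
--     idx = 0
--     idx2 = 0
--     data = {}
--
--     for i, word in enumerate(words):
--         if word in unks:
--             key = get_key(word, data)
--
--             if key is None:
--                 key = f'unk{idx}'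
--                 data[key] = word
--                 idx += 1
--
--             words[i] = key
--
--         if word in oprs:
--             key = get_key(word, data)
--
--             if key is None:
--                 key = f'opr{idx2}'
--                 data[key] = word
--                 idx2 += 1
--
--             words[i] = key
--
--     return ' '.join(words), data
-- ===== SOURCE B (Python) =====
-- def convert_unk_opr(text):
--     """Staged rewrite: dedup the special tokens in first-appearance order,
--     build the key table from that short distinct list, then translate."""
--     unks = ['A', 'B']
--     oprs = ['+', '-', '*', '/']
--
--     words = text.split()
--
--     # stage 1: distinct special tokens, first-appearance order
--     firsts = dict.fromkeys(w for w in words if w in unks or w in oprs)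
--
--     # stage 2: key table over the (at most six) distinct special tokens
--     mapping = {}
--     data = {}
--     n_unk = 0
--     n_opr = 0
--     for t in firsts:
--         if t in unks:
--             key, n_unk = f'unk{n_unk}', n_unk + 1
--         else:
--             key, n_opr = f'opr{n_opr}', n_opr + 1
--         mapping[t] = key
--         data[key] = t
--
--     # stage 3: translate every token through the table
--     return ' '.join(mapping.get(w, w) for w in words), data
-- ===== Notes on version B (the rewrite author's own statement) =====
-- stated objective: alternative
-- what changed: A is one token-driven pass that mutates the word list, scanning the data dict's values (get_key) at every special token to decide reuse; B is three staged passes with no per-token seen check: dedup of the special tokens in first-appearance order (dict.fromkeys), key assignment over that short distinct list alone, then a pure translation pass through the finished table.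
import Mathlib
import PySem

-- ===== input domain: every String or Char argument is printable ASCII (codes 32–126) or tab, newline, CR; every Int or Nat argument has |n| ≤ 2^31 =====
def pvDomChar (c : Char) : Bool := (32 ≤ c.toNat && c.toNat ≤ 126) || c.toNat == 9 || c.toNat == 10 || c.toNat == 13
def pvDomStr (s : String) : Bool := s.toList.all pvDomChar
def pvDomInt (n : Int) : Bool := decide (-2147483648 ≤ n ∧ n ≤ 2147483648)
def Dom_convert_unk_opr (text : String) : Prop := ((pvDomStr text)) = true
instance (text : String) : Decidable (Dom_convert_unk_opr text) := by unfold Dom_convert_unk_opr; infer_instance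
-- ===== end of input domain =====

-- B replaces A's single token-driven pass (which scans data's values via get_key at every
-- special token) by three staged passes: ordered dedup of the special tokens, key assignment
-- over that short distinct list alone, then a pure translation pass (objective: alternative).

-- ===== PORT A =====
-- get_key: scan data.items() in order, return the first key whose value equals `value`
def get_key_items (value : String) : List (String × String) → Option String
  | [] => none
  | (k, v) :: rest => if value == v then some k else get_key_items value rest

def get_key (value : String) (data : PySem.Dict String String) : Option String :=
  get_key_items value data.items

-- one iteration of A's for-loop: the two sequential `if` branches of the Python body,
-- s1/s2 = (current words[i] slot, data, counter) after the unks / oprs `if`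
def aStep (st : List String × PySem.Dict String String × Int × Int) (word : String) :
    List String × PySem.Dict String String × Int × Int :=
  let s1 : String × PySem.Dict String String × Int :=
    if (["A", "B"] : List String).contains word then
      match get_key word st.2.1 with
      | some key => (key, st.2.1, st.2.2.1)
      | none =>
        let key := "unk" ++ PySem.Int.toStr st.2.2.1
        (key, st.2.1.insert key word, st.2.2.1 + 1)
    else (word, st.2.1, st.2.2.1)
  let s2 : String × PySem.Dict String String × Int :=
    if (["+", "-", "*", "/"] : List String).contains word then
      match get_key word s1.2.1 with
      | some key => (key, s1.2.1, st.2.2.2)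
      | none =>
        let key := "opr" ++ PySem.Int.toStr st.2.2.2
        (key, s1.2.1.insert key word, st.2.2.2 + 1)
    else (s1.1, s1.2.1, st.2.2.2)
  (st.1 ++ [s2.1], s2.2.1, s1.2.2, s2.2.2)

def convert_unk_opr (text : String) : String × (List (String × String)) :=
  let words := PySem.Str.split₀ text
  let fin := words.foldl aStep ([], PySem.Dict.empty, 0, 0)
  (PySem.Str.join " " fin.1, fin.2.1.items)

-- ===== PORT B =====
-- `w in unks or w in oprs`
def pvSpecial (w : String) : Bool :=
  (["A", "B"] : List String).contains w || (["+", "-", "*", "/"] : List String).contains w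

-- stage-2 body: assign the next unk/opr key to one distinct special token;
-- state = (mapping, data, n_unk, n_opr)
def bAssign (st : PySem.Dict String String × PySem.Dict String String × Int × Int)
    (t : String) : PySem.Dict String String × PySem.Dict String String × Int × Int :=
  if (["A", "B"] : List String).contains t then
    let key := "unk" ++ PySem.Int.toStr st.2.2.1
    (st.1.insert t key, st.2.1.insert key t, st.2.2.1 + 1, st.2.2.2)
  else
    let key := "opr" ++ PySem.Int.toStr st.2.2.2
    (st.1.insert t key, st.2.1.insert key t, st.2.2.1, st.2.2.2 + 1)

def convert_unk_opr_alt (text : String) : String × (List (String × String)) :=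
  let words := PySem.Str.split₀ text
  -- stage 1: dict.fromkeys(...) = ordered dedup (PySem.List.dedup) of the special tokens
  let firsts := PySem.List.dedup (words.filter pvSpecial)
  -- stage 2: key table over the distinct special tokens
  let fin := firsts.foldl bAssign (PySem.Dict.empty, PySem.Dict.empty, 0, 0)
  -- stage 3: translate every token through the finished table
  (PySem.Str.join " " (words.map (fun w => (fin.1.get? w).getD w)), fin.2.1.items)

-- ===== PRECONDITION & SPEC =====
def Spec_convert_unk_opr (text : String) (out : String × (List (String × String))) : Prop := out = convert_unk_opr_alt text
instance (text : String) (out : String × (List (String × String))) : Decidable (Spec_convert_unk_opr text out) := by unfold Spec_convert_unk_opr; infer_instance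

-- ===== CLAIM (what is proved, stated in full; the proofs are below) =====
def Claim_equal_convert_unk_opr : Prop := ∀ (text : String), Dom_convert_unk_opr text → Spec_convert_unk_opr text (convert_unk_opr text)

-- ===== LEMMAS AND PROOFS =====

-- proof-side bridge: the fused one-pass table builder A's loop is compared against
def bScan (st : PySem.Dict String String × PySem.Dict String String × Int × Int)
    (w : String) : PySem.Dict String String × PySem.Dict String String × Int × Int :=
  if st.1.contains w then st
  else if (["A", "B"] : List String).contains w then
    let key := "unk" ++ PySem.Int.toStr st.2.2.1
    (st.1.insert w key, st.2.1.insert key w, st.2.2.1 + 1, st.2.2.2)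
  else if (["+", "-", "*", "/"] : List String).contains w then
    let key := "opr" ++ PySem.Int.toStr st.2.2.2
    (st.1.insert w key, st.2.1.insert key w, st.2.2.1, st.2.2.2 + 1)
  else st

-- the tokens the loop rewrites
def pvSpecials : List String := ["A", "B", "+", "-", "*", "/"]

-- loop invariant tying A's state (data, idx, idx2) to the scan state (mapping, data, n_unk, n_opr)
def pvInv (data mapping : PySem.Dict String String) (idx idx2 : Int) : Prop :=
  (∀ v, get_key v data = mapping.get? v) ∧
  (∀ k ∈ mapping.keys, k ∈ pvSpecials) ∧
  (∀ p ∈ data.items, ∃ j : Int, 0 ≤ j ∧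
      ((p.1 = "unk" ++ PySem.Int.toStr j ∧ j < idx) ∨ (p.1 = "opr" ++ PySem.Int.toStr j ∧ j < idx2))) ∧
  idx = (if mapping.contains "A" then (1:Int) else 0) + (if mapping.contains "B" then 1 else 0) ∧
  idx2 = (if mapping.contains "+" then (1:Int) else 0) + (if mapping.contains "-" then 1 else 0) +
         (if mapping.contains "*" then 1 else 0) + (if mapping.contains "/" then 1 else 0)

lemma pv_toStr_ne (i j : Int) (h0 : 0 ≤ i) (hij : i < j) (hj : j ≤ 4) :
    PySem.Int.toStr i ≠ PySem.Int.toStr j := by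
  have h3 : i ≤ 3 := by omega
  interval_cases i <;> interval_cases j <;> decide

lemma pv_unk_ne_opr (i j : Int) : ("unk" ++ PySem.Int.toStr i) ≠ ("opr" ++ PySem.Int.toStr j) := by
  intro h
  have := congrArg String.toList h
  simp at this

lemma gk_append (v : String) (l : List (String × String)) (k w : String) :
    get_key_items v (l ++ [(k, w)]) =
      match get_key_items v l with
      | some x => some x
      | none => if v == w then some k else none := by
  induction l with
  | nil => simp [get_key_items]
  | cons p rest ih => cases p; simp [get_key_items]; split <;> simp [ih]

lemma pv_get?_none_of_contains_false (m : PySem.Dict String String) (w : String)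
    (h : m.contains w = false) : m.get? w = none := by
  rw [PySem.Dict.contains_eq_isSome_get?] at h
  cases hg : m.get? w <;> simp [hg] at h ⊢

-- get? survives the rest of the scan
lemma bscan_mono_some (ws : List String)
    (st : PySem.Dict String String × PySem.Dict String String × Int × Int)
    (v k : String) (h : st.1.get? v = some k) :
    ((ws.foldl bScan st).1).get? v = some k := by
  induction ws generalizing st with
  | nil => exact h
  | cons w ws ih =>
    apply ih
    unfold bScan
    split_ifs with h1 h2 h3
    · exact h
    all_goals try exact h
    all_goals {
      have hw : st.1.get? w = none := pv_get?_none_of_contains_false _ _ (by simpa using h1)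
      have hvw : ¬ (v = w) := by intro e; rw [e, hw] at h; simp at h
      simp [PySem.Dict.get?_insert, hvw, h]
    }

-- a non-special token never enters the mapping
lemma bscan_mono_none (ws : List String)
    (st : PySem.Dict String String × PySem.Dict String String × Int × Int)
    (v : String) (hv : v ∉ pvSpecials) (h : st.1.get? v = none) :
    ((ws.foldl bScan st).1).get? v = none := by
  induction ws generalizing st with
  | nil => exact h
  | cons w ws ih =>
    apply ih
    unfold bScan
    split_ifs with h1 h2 h3
    · exact h
    · have hvw : ¬ (v = w) := by
        intro e; subst e; simp at h2
        simp [pvSpecials] at hv; rcases h2 with rfl | rfl <;> simp at hv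
      simp [PySem.Dict.get?_insert, hvw, h]
    · have hvw : ¬ (v = w) := by
        intro e; subst e; simp at h3
        simp [pvSpecials] at hv; rcases h3 with rfl | rfl | rfl | rfl <;> simp at hv
      simp [PySem.Dict.get?_insert, hvw, h]
    · exact h

-- counter bounds from the invariant's counting clauses
lemma pv_idx_bounds (data mapping : PySem.Dict String String) (idx idx2 : Int)
    (hInv : pvInv data mapping idx idx2) : 0 ≤ idx ∧ idx ≤ 2 ∧ 0 ≤ idx2 ∧ idx2 ≤ 4 := by
  obtain ⟨-, -, -, h1, h2⟩ := hInv
  split_ifs at h1 h2 <;> omega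

-- the next generated key is absent from data
lemma pv_fresh_unk (data mapping : PySem.Dict String String) (idx idx2 : Int)
    (hInv : pvInv data mapping idx idx2) :
    data.contains ("unk" ++ PySem.Int.toStr idx) = false := by
  obtain ⟨h0, h2, h0', h4⟩ := pv_idx_bounds data mapping idx idx2 hInv
  obtain ⟨-, -, hKeys, -⟩ := hInv
  by_contra hc
  have hct : data.contains ("unk" ++ PySem.Int.toStr idx) = true := by simpa using hc
  have hc' : ("unk" ++ PySem.Int.toStr idx) ∈ data.keys := (PySem.Dict.contains_iff_mem_keys _ _).mp hct
  obtain ⟨b, hb⟩ := by simpa [PySem.Dict.keys, List.mem_map] using hc'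
  obtain ⟨j, hj0, hj⟩ := hKeys _ hb
  rcases hj with ⟨he, hlt⟩ | ⟨he, -⟩
  · exact pv_toStr_ne j idx hj0 hlt (by omega) ((String.append_right_inj "unk").mp he).symm
  · exact pv_unk_ne_opr idx j he
lemma pv_fresh_opr (data mapping : PySem.Dict String String) (idx idx2 : Int)
    (hInv : pvInv data mapping idx idx2) :
    data.contains ("opr" ++ PySem.Int.toStr idx2) = false := by
  obtain ⟨h0, h2, h0', h4⟩ := pv_idx_bounds data mapping idx idx2 hInv
  obtain ⟨-, -, hKeys, -⟩ := hInv
  by_contra hc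
  have hct : data.contains ("opr" ++ PySem.Int.toStr idx2) = true := by simpa using hc
  have hc' : ("opr" ++ PySem.Int.toStr idx2) ∈ data.keys := (PySem.Dict.contains_iff_mem_keys _ _).mp hct
  obtain ⟨b, hb⟩ := by simpa [PySem.Dict.keys, List.mem_map] using hc'
  obtain ⟨j, hj0, hj⟩ := hKeys _ hb
  rcases hj with ⟨he, -⟩ | ⟨he, hlt⟩
  · exact pv_unk_ne_opr j idx2 he.symm
  · exact pv_toStr_ne j idx2 hj0 hlt h4 ((String.append_right_inj "opr").mp he).symm

-- invariant preservation when a new unk token is inserted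
lemma pvInv_insert_unk (data mapping : PySem.Dict String String) (idx idx2 : Int)
    (hInv : pvInv data mapping idx idx2) (w : String) (hw : w = "A" ∨ w = "B")
    (hnone : get_key w data = none) :
    pvInv (data.insert ("unk" ++ PySem.Int.toStr idx) w)
          (mapping.insert w ("unk" ++ PySem.Int.toStr idx)) (idx + 1) idx2 := by
  have hfresh := pv_fresh_unk data mapping idx idx2 hInv
  obtain ⟨hb0, -, -, -⟩ := pv_idx_bounds data mapping idx idx2 hInv
  obtain ⟨hGK, hMK, hKeys, hIdx, hIdx2⟩ := hInv
  have hmw : mapping.get? w = none := by rw [← hGK]; exact hnone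
  have hcw : mapping.contains w = false := by
    rw [PySem.Dict.contains_eq_isSome_get?, hmw]; rfl
  refine ⟨?_, ?_, ?_, ?_, ?_⟩
  · intro v
    rw [get_key, PySem.Dict.items_insert_of_not_contains data hfresh (v := w), gk_append,
        PySem.Dict.get?_insert]
    by_cases hv : v = w
    · subst hv; rw [show get_key_items v data.items = none from hnone]; simp
    · have : (v == w) = false := by simpa using hv
      cases hg : get_key_items v data.items <;>
        simp [hv, this, ← hGK v, get_key, hg]
  · intro k hk
    rw [PySem.Dict.mem_keys_insert] at hk
    rcases hk with rfl | hk
    · rcases hw with rfl | rfl <;> simp [pvSpecials]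
    · exact hMK k hk
  · intro p hp
    rw [PySem.Dict.items_insert_of_not_contains data hfresh (v := w), List.mem_append] at hp
    rcases hp with hp | hp
    · obtain ⟨j, hj0, hj⟩ := hKeys p hp
      exact ⟨j, hj0, by rcases hj with ⟨he, hl⟩ | ⟨he, hl⟩; exacts [Or.inl ⟨he, by omega⟩, Or.inr ⟨he, hl⟩]⟩
    · simp at hp
      exact ⟨idx, hb0, Or.inl ⟨by rw [hp], by omega⟩⟩
  · rcases hw with rfl | rfl <;>
      simp only [PySem.Dict.contains_insert] at * <;>
      rw [hIdx] <;> rw [hcw] <;> simp <;> split_ifs <;> omega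
  · rcases hw with rfl | rfl <;>
      simp only [PySem.Dict.contains_insert] <;>
      rw [hIdx2] <;> simp

-- invariant preservation when a new opr token is inserted
lemma pvInv_insert_opr (data mapping : PySem.Dict String String) (idx idx2 : Int)
    (hInv : pvInv data mapping idx idx2) (w : String)
    (hw : w = "+" ∨ w = "-" ∨ w = "*" ∨ w = "/")
    (hnone : get_key w data = none) :
    pvInv (data.insert ("opr" ++ PySem.Int.toStr idx2) w)
          (mapping.insert w ("opr" ++ PySem.Int.toStr idx2)) idx (idx2 + 1) := by
  have hfresh := pv_fresh_opr data mapping idx idx2 hInv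
  obtain ⟨-, -, hb0, -⟩ := pv_idx_bounds data mapping idx idx2 hInv
  obtain ⟨hGK, hMK, hKeys, hIdx, hIdx2⟩ := hInv
  have hmw : mapping.get? w = none := by rw [← hGK]; exact hnone
  have hcw : mapping.contains w = false := by
    rw [PySem.Dict.contains_eq_isSome_get?, hmw]; rfl
  refine ⟨?_, ?_, ?_, ?_, ?_⟩
  · intro v
    rw [get_key, PySem.Dict.items_insert_of_not_contains data hfresh (v := w), gk_append,
        PySem.Dict.get?_insert]
    by_cases hv : v = w
    · subst hv; rw [show get_key_items v data.items = none from hnone]; simp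
    · have : (v == w) = false := by simpa using hv
      cases hg : get_key_items v data.items <;>
        simp [hv, this, ← hGK v, get_key, hg]
  · intro k hk
    rw [PySem.Dict.mem_keys_insert] at hk
    rcases hk with rfl | hk
    · rcases hw with rfl | rfl | rfl | rfl <;> simp [pvSpecials]
    · exact hMK k hk
  · intro p hp
    rw [PySem.Dict.items_insert_of_not_contains data hfresh (v := w), List.mem_append] at hp
    rcases hp with hp | hp
    · obtain ⟨j, hj0, hj⟩ := hKeys p hp
      exact ⟨j, hj0, by rcases hj with ⟨he, hl⟩ | ⟨he, hl⟩; exacts [Or.inl ⟨he, hl⟩, Or.inr ⟨he, by omega⟩]⟩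
    · simp at hp
      exact ⟨idx2, hb0, Or.inr ⟨by rw [hp], by omega⟩⟩
  · rcases hw with rfl | rfl | rfl | rfl <;>
      simp only [PySem.Dict.contains_insert] <;>
      rw [hIdx] <;> simp
  · rcases hw with rfl | rfl | rfl | rfl <;>
      simp only [PySem.Dict.contains_insert] at * <;>
      rw [hIdx2] <;> rw [hcw] <;> simp <;> split_ifs <;> omega

-- A's loop over ws from an invariant state equals translating through the scan's finished table
lemma pv_loop_eq (ws : List String) (out : List String)
    (data mapping : PySem.Dict String String) (idx idx2 : Int)
    (hInv : pvInv data mapping idx idx2) :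
    ws.foldl aStep (out, data, idx, idx2) =
      (out ++ ws.map (fun w => (((ws.foldl bScan (mapping, data, idx, idx2)).1).get? w).getD w),
       (ws.foldl bScan (mapping, data, idx, idx2)).2.1,
       (ws.foldl bScan (mapping, data, idx, idx2)).2.2.1,
       (ws.foldl bScan (mapping, data, idx, idx2)).2.2.2) := by
  induction ws generalizing out data mapping idx idx2 with
  | nil => simp
  | cons w ws ih =>
    obtain ⟨hGK, hMK, hKeys, hIdx, hIdx2⟩ := hInv
    simp only [List.foldl_cons, List.map_cons]
    by_cases hPU : w = "A" ∨ w = "B"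
    · have hPO : ¬ (w = "+" ∨ w = "-" ∨ w = "*" ∨ w = "/") := by
        rcases hPU with rfl | rfl <;> simp
      cases hg : get_key w data with
      | some k =>
        have hmw : mapping.get? w = some k := by rw [← hGK]; exact hg
        have hcw : mapping.contains w = true := by
          rw [PySem.Dict.contains_eq_isSome_get?, hmw]; rfl
        have hA : aStep (out, data, idx, idx2) w = (out ++ [k], data, idx, idx2) := by
          simp [aStep, hPU, hPO, hg]
        have hB : bScan (mapping, data, idx, idx2) w = (mapping, data, idx, idx2) := by
          simp [bScan, hcw]
        rw [hA, hB, ih (out ++ [k]) data mapping idx idx2 ⟨hGK, hMK, hKeys, hIdx, hIdx2⟩]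
        rw [bscan_mono_some ws (mapping, data, idx, idx2) w k hmw]
        simp
      | none =>
        have hmw : mapping.get? w = none := by rw [← hGK]; exact hg
        have hcw : mapping.contains w = false := by
          rw [PySem.Dict.contains_eq_isSome_get?, hmw]; rfl
        have hA : aStep (out, data, idx, idx2) w =
            (out ++ ["unk" ++ PySem.Int.toStr idx],
             data.insert ("unk" ++ PySem.Int.toStr idx) w, idx + 1, idx2) := by
          simp [aStep, hPU, hPO, hg]
        have hB : bScan (mapping, data, idx, idx2) w =
            (mapping.insert w ("unk" ++ PySem.Int.toStr idx),
             data.insert ("unk" ++ PySem.Int.toStr idx) w, idx + 1, idx2) := by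
          simp [bScan, hcw, hPU]
        have hInv' := pvInv_insert_unk data mapping idx idx2
          ⟨hGK, hMK, hKeys, hIdx, hIdx2⟩ w hPU hg
        rw [hA, hB, ih _ _ _ _ _ hInv']
        rw [bscan_mono_some ws _ w ("unk" ++ PySem.Int.toStr idx)
          (by simpa using PySem.Dict.get?_insert_self mapping w ("unk" ++ PySem.Int.toStr idx))]
        simp
    · by_cases hPO : w = "+" ∨ w = "-" ∨ w = "*" ∨ w = "/"
      · cases hg : get_key w data with
        | some k =>
          have hmw : mapping.get? w = some k := by rw [← hGK]; exact hg
          have hcw : mapping.contains w = true := by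
            rw [PySem.Dict.contains_eq_isSome_get?, hmw]; rfl
          have hA : aStep (out, data, idx, idx2) w = (out ++ [k], data, idx, idx2) := by
            simp [aStep, hPU, hPO, hg]
          have hB : bScan (mapping, data, idx, idx2) w = (mapping, data, idx, idx2) := by
            simp [bScan, hcw]
          rw [hA, hB, ih (out ++ [k]) data mapping idx idx2 ⟨hGK, hMK, hKeys, hIdx, hIdx2⟩]
          rw [bscan_mono_some ws (mapping, data, idx, idx2) w k hmw]
          simp
        | none =>
          have hmw : mapping.get? w = none := by rw [← hGK]; exact hg
          have hcw : mapping.contains w = false := by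
            rw [PySem.Dict.contains_eq_isSome_get?, hmw]; rfl
          have hA : aStep (out, data, idx, idx2) w =
              (out ++ ["opr" ++ PySem.Int.toStr idx2],
               data.insert ("opr" ++ PySem.Int.toStr idx2) w, idx, idx2 + 1) := by
            simp [aStep, hPU, hPO, hg]
          have hB : bScan (mapping, data, idx, idx2) w =
              (mapping.insert w ("opr" ++ PySem.Int.toStr idx2),
               data.insert ("opr" ++ PySem.Int.toStr idx2) w, idx, idx2 + 1) := by
            simp [bScan, hcw, hPU, hPO]
          have hInv' := pvInv_insert_opr data mapping idx idx2
            ⟨hGK, hMK, hKeys, hIdx, hIdx2⟩ w hPO hg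
          rw [hA, hB, ih _ _ _ _ _ hInv']
          rw [bscan_mono_some ws _ w ("opr" ++ PySem.Int.toStr idx2)
            (by simpa using PySem.Dict.get?_insert_self mapping w ("opr" ++ PySem.Int.toStr idx2))]
          simp
      · have hwS : w ∉ pvSpecials := by simp [pvSpecials]; tauto
        have hcw : mapping.contains w = false := by
          by_contra hc
          have hct : mapping.contains w = true := by simpa using hc
          exact hwS (hMK w ((PySem.Dict.contains_iff_mem_keys _ _).mp hct))
        have hmw : mapping.get? w = none := pv_get?_none_of_contains_false _ _ hcw
        have hA : aStep (out, data, idx, idx2) w = (out ++ [w], data, idx, idx2) := by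
          simp [aStep, hPU, hPO]
        have hB : bScan (mapping, data, idx, idx2) w = (mapping, data, idx, idx2) := by
          simp [bScan, hcw, hPU, hPO]
        rw [hA, hB, ih (out ++ [w]) data mapping idx idx2 ⟨hGK, hMK, hKeys, hIdx, hIdx2⟩]
        rw [bscan_mono_none ws (mapping, data, idx, idx2) w hwS hmw]
        simp

lemma pv_inv_init : pvInv PySem.Dict.empty PySem.Dict.empty 0 0 := by
  refine ⟨fun v => ?_, ?_, ?_, ?_, ?_⟩ <;>
    simp [get_key, get_key_items, PySem.Dict.empty, PySem.Dict.get?, pysem]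

-- the special tokens of ws that are not yet in `seen`, first occurrences in order
def pvNew (seen : List String) : List String → List String
  | [] => []
  | w :: ws =>
    if pvSpecial w && !(seen.contains w) then w :: pvNew (seen ++ [w]) ws
    else pvNew seen ws

-- stage 1 of B computes exactly pvNew [] words
lemma pv_dedup_filter (ws : List String) : ∀ (seen : List String),
    (ws.filter pvSpecial).foldl PySem.Set.add seen = seen ++ pvNew seen ws := by
  induction ws with
  | nil => intro seen; simp [pvNew]
  | cons w ws ih =>
    intro seen
    by_cases hs : pvSpecial w = true
    · by_cases hm : seen.contains w = true
      · have hmem : w ∈ seen := by simpa using hm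
        simp [hs, hmem, pvNew, PySem.Set.add, ih]
      · have hmem : ¬ (w ∈ seen) := by simpa using hm
        simp [hs, hmem, pvNew, PySem.Set.add, ih (seen ++ [w])]
    · simp [hs, pvNew, ih]

-- the fused scan over the words equals stage 2's assign fold over pvNew
lemma pv_scan_eq_assign (ws : List String) :
    ∀ (st : PySem.Dict String String × PySem.Dict String String × Int × Int)
      (seen : List String), (∀ w, st.1.contains w = seen.contains w) →
    ws.foldl bScan st = (pvNew seen ws).foldl bAssign st := by
  induction ws with
  | nil => intro st seen _; simp [pvNew]
  | cons w ws ih =>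
    intro st seen h
    by_cases hc : st.1.contains w = true
    · have hm : seen.contains w = true := by rw [← h]; exact hc
      have hB : bScan st w = st := by simp [bScan, hc]
      simp only [List.foldl_cons, hB, pvNew, hm, Bool.not_true, Bool.and_false,
        Bool.false_eq_true]
      exact ih st seen h
    · have hm : seen.contains w = false := by rw [← h]; simpa using hc
      by_cases hs : pvSpecial w = true
      · by_cases hU : w = "A" ∨ w = "B"
        · have hBA : bScan st w = bAssign st w := by simp [bScan, bAssign, hc, hU]
          have hnext : ∀ x, ((bAssign st w).1).contains x = (seen ++ [w]).contains x := by
            intro x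
            have : (bAssign st w).1 = st.1.insert w ("unk" ++ PySem.Int.toStr st.2.2.1) := by
              simp [bAssign, hU]
            rw [this, PySem.Dict.contains_insert, h x]
            cases hxw : (x == w) <;> simp_all
          simp only [List.foldl_cons, pvNew, hs, hm, Bool.not_false, Bool.and_true]
          rw [hBA]
          exact ih (bAssign st w) (seen ++ [w]) hnext
        · have hO : w = "+" ∨ w = "-" ∨ w = "*" ∨ w = "/" := by
            have := hs; simp [pvSpecial] at this; tauto
          have hBA : bScan st w = bAssign st w := by simp [bScan, bAssign, hc, hU, hO]
          have hnext : ∀ x, ((bAssign st w).1).contains x = (seen ++ [w]).contains x := by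
            intro x
            have : (bAssign st w).1 = st.1.insert w ("opr" ++ PySem.Int.toStr st.2.2.2) := by
              simp [bAssign, hU]
            rw [this, PySem.Dict.contains_insert, h x]
            cases hxw : (x == w) <;> simp_all
          simp only [List.foldl_cons, pvNew, hs, hm, Bool.not_false, Bool.and_true]
          rw [hBA]
          exact ih (bAssign st w) (seen ++ [w]) hnext
      · have hU : ¬ (w = "A" ∨ w = "B") := by
          intro hx; exact hs (by simp [pvSpecial]; tauto)
        have hO : ¬ (w = "+" ∨ w = "-" ∨ w = "*" ∨ w = "/") := by
          intro hx; exact hs (by simp [pvSpecial]; tauto)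
        have hB : bScan st w = st := by simp [bScan, hc, hU, hO]
        simp only [List.foldl_cons, hB, pvNew, hs, Bool.false_and,
          Bool.false_eq_true]
        exact ih st seen h

-- ===== VERDICT (by name: the statement is the Claim_ definition above) =====
theorem convert_unk_opr_spec : Claim_equal_convert_unk_opr := by
  intro text _
  unfold Spec_convert_unk_opr convert_unk_opr convert_unk_opr_alt
  dsimp only
  rw [pv_loop_eq (PySem.Str.split₀ text) [] PySem.Dict.empty PySem.Dict.empty 0 0 pv_inv_init]
  have hM : PySem.List.dedup ((PySem.Str.split₀ text).filter pvSpecial) =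
      pvNew [] (PySem.Str.split₀ text) := by
    have := pv_dedup_filter (PySem.Str.split₀ text) []
    simpa [PySem.List.dedup, PySem.Set.ofList, PySem.Set.empty] using this
  have hL : (PySem.Str.split₀ text).foldl bScan (PySem.Dict.empty, PySem.Dict.empty, 0, 0) =
      (pvNew [] (PySem.Str.split₀ text)).foldl bAssign
        (PySem.Dict.empty, PySem.Dict.empty, 0, 0) := by
    apply pv_scan_eq_assign
    intro w
    simp [PySem.Dict.empty, PySem.Dict.contains, pysem]
  rw [hM, ← hL]
  simp
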